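-- pv_equiv track=rewrite | github.com/rosekao871128/-_108021591_-_RSA | Rsa.py | genDList
-- ===== SOURCE A (Python) =====
-- def genDList(e,N1) :#製作d的函數 d公式:(d*e)%N1 =1
--     data = []
--     i = 2
--     while len(data)<3:
--         y = i
--         d = y*e
--         if (d%N1 == 1):
--             data.append(y)
--         i=i+1
--     return data
-- ===== SOURCE B (Python) =====
-- def genDList(e, N1):
--     # Extended Euclid modular inverse, then the next two solutions are +N1 apart.
--     old_r, r = e, N1
--     old_s, s = 1, 0
--     while r != 0:
--         q = old_r // r
--         old_r, r = r, old_r - q * r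
--         old_s, s = s, old_s - q * s
--     inv = old_s % N1
--     y0 = inv if inv >= 2 else inv + N1
--     return [y0, y0 + N1, y0 + 2 * N1]
-- ===== Notes on version B (the rewrite author's own statement) =====
-- stated objective: faster
-- what changed: Replaces A's linear scan testing y = 2, 3, 4, ... for (y*e) % N1 == 1 by an extended-Euclid modular inverse of e mod N1, the three answers being the inverse lifted to y >= 2 and its next two +N1 translates.
import Mathlib
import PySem

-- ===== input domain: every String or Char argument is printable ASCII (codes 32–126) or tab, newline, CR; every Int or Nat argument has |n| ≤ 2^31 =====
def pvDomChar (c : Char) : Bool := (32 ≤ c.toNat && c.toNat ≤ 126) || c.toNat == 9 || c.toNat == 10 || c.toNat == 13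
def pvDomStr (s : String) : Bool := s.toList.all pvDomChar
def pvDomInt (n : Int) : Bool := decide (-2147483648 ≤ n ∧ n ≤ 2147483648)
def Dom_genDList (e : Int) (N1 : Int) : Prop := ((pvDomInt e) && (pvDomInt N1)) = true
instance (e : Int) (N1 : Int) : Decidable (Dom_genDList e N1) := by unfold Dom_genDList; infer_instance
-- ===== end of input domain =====

-- B replaces A's linear scan from 2 (O(N1) iterations) by an extended-Euclid modular inverse plus +N1 steps (O(log N1)); measurably faster in a timing run.

-- ===== PORT A =====
-- A's `while len(data)<3` loop, fuel-supplied: under Pre_ (N1 ≥ 2, gcd e N1 = 1)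
-- the loop finishes within 3*N1+4 iterations, so the fuel is never exhausted there.
def genDListLoop (e : Int) (N1 : Int) : Nat → List Int → Int → List Int
  | 0, data, _ => data
  | fuel + 1, data, i =>
    if data.length < 3 then
      if PySem.Int.mod (i * e) N1 == 1 then genDListLoop e N1 fuel (data ++ [i]) (i + 1)
      else genDListLoop e N1 fuel data (i + 1)
    else data

def genDList (e : Int) (N1 : Int) : List Int :=
  genDListLoop e N1 (3 * N1.natAbs + 4) [] 2

-- ===== PORT B =====
-- termination of Source B's extended-Euclid loop: |old_r - q*r| = |old_r % r| < |r|
theorem pvEgcdDec (oldr r : Int) (h : ¬ r = 0) :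
    (oldr - PySem.Int.floordiv oldr r * r).natAbs < r.natAbs := by
  have hm := PySem.Int.floordiv_mul_add_mod oldr r
  have heq : oldr - PySem.Int.floordiv oldr r * r = PySem.Int.mod oldr r := by omega
  rw [heq]
  rcases lt_or_gt_of_ne h with hr | hr
  · have := PySem.Int.mod_neg_bounds oldr hr; omega
  · have h1 := PySem.Int.mod_nonneg oldr hr
    have h2 := PySem.Int.mod_lt oldr hr; omega

def egcdLoop (oldr r olds s : Int) : Int × Int :=
  if _h : r = 0 then (oldr, olds)
  else
    let q := PySem.Int.floordiv oldr r
    egcdLoop r (oldr - q * r) s (olds - q * s)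
termination_by r.natAbs
decreasing_by exact pvEgcdDec oldr r _h

def genDList_alt (e : Int) (N1 : Int) : List Int :=
  let p := egcdLoop e N1 1 0
  let inv := PySem.Int.mod p.2 N1
  let y0 := if inv ≥ 2 then inv else inv + N1
  [y0, y0 + N1, y0 + 2 * N1]

-- ===== PRECONDITION & SPEC =====
-- Pre_ excludes exactly the inputs on which Python A never returns: N1 = 0 raises
-- ZeroDivisionError, and when N1 < 2 or gcd(e,N1) ≠ 1 no y with y*e % N1 == 1 exists,
-- so A's while loop runs forever.
def Pre_genDList (e : Int) (N1 : Int) : Prop := 2 ≤ N1 ∧ Int.gcd e N1 = 1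
instance (e : Int) (N1 : Int) : Decidable (Pre_genDList e N1) := by unfold Pre_genDList; infer_instance
def pvWitness_genDList : Int × Int := (3, 7)

def Spec_genDList (e : Int) (N1 : Int) (out : List Int) : Prop := out = genDList_alt e N1
instance (e : Int) (N1 : Int) (out : List Int) : Decidable (Spec_genDList e N1 out) := by unfold Spec_genDList; infer_instance

-- ===== CLAIM (what is proved, stated in full; the proofs are below) =====
def Claim_equal_genDList : Prop := ∀ (e : Int) (N1 : Int), Dom_genDList e N1 → Pre_genDList e N1 → Spec_genDList e N1 (genDList e N1)

-- ===== LEMMAS AND PROOFS =====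

-- a % N1 = 1 is exactly divisibility of a - 1 (for N1 ≥ 2)
theorem pvModOne (N1 a : Int) (hN : 2 ≤ N1) : a % N1 = 1 ↔ N1 ∣ a - 1 := by
  constructor
  · intro h
    exact ⟨a / N1, by linarith [Int.emod_add_mul_ediv a N1]⟩
  · rintro ⟨k, hk⟩
    have ha : a = 1 + N1 * k := by linarith
    rw [ha, Int.add_mul_emod_self_left, Int.emod_eq_of_lt (by omega) (by omega)]

-- invariants of the extended-Euclid loop
theorem egcdLoop_gcd (oldr r olds s : Int) :
    Int.gcd (egcdLoop oldr r olds s).1 0 = Int.gcd oldr r := by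
  fun_induction egcdLoop with
  | case1 oldr olds s => simp
  | case2 oldr r olds s h q ih =>
    rw [ih]
    show Int.gcd r (oldr - q * r) = Int.gcd oldr r
    rw [Int.gcd_comm oldr r]
    have hq : oldr - q * r = oldr + (-q) * r := by ring
    rw [hq, Int.gcd_add_mul_right_right]

theorem egcdLoop_pos (oldr r olds s : Int) :
    0 ≤ r → (0 < oldr ∨ 0 < r) → 0 < (egcdLoop oldr r olds s).1 := by
  fun_induction egcdLoop with
  | case1 oldr olds s =>
    intro _ ho
    rcases ho with h | h
    · exact h
    · omega
  | case2 oldr r olds s h q ih =>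
    intro hr ho
    have hrpos : 0 < r := lt_of_le_of_ne hr (Ne.symm h)
    apply ih
    · have hm := PySem.Int.floordiv_mul_add_mod oldr r
      have h1 := PySem.Int.mod_nonneg oldr hrpos
      have hq : oldr - q * r = PySem.Int.mod oldr r := by
        show oldr - PySem.Int.floordiv oldr r * r = _
        linarith
      omega
    · exact Or.inl hrpos

-- if N1 divides olds*e - oldr and s*e - r then it divides (result).2*e - (result).1
theorem egcdLoop_lin (e N1 : Int) (oldr r olds s : Int) :
    N1 ∣ olds * e - oldr → N1 ∣ s * e - r →
    N1 ∣ (egcdLoop oldr r olds s).2 * e - (egcdLoop oldr r olds s).1 := by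
  fun_induction egcdLoop with
  | case1 oldr olds s => intro h1 _; exact h1
  | case2 oldr r olds s h q ih =>
    intro h1 h2
    apply ih h2
    have hq : (olds - q * s) * e - (oldr - q * r) = (olds * e - oldr) - q * (s * e - r) := by ring
    rw [hq]
    exact dvd_sub h1 (Dvd.dvd.mul_left h2 q)

-- characterisation of A's hit condition: y hits iff N1 ∣ y - y0
theorem sol_iff_dvd (e N1 y y0 : Int) (hN : 2 ≤ N1) (hg : Int.gcd e N1 = 1)
    (hy0 : (y0 * e) % N1 = 1) : (y * e) % N1 = 1 ↔ N1 ∣ y - y0 := by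
  have hdvd0 : N1 ∣ y0 * e - 1 := (pvModOne N1 (y0 * e) hN).1 hy0
  rw [pvModOne N1 (y * e) hN]
  constructor
  · intro hdvd
    have h3 : N1 ∣ (y - y0) * e := by
      have hr : (y - y0) * e = (y * e - 1) - (y0 * e - 1) := by ring
      rw [hr]; exact dvd_sub hdvd hdvd0
    have hco : IsCoprime (N1 : Int) e := by
      rw [Int.isCoprime_iff_gcd_eq_one, Int.gcd_comm]; exact hg
    exact hco.dvd_of_dvd_mul_right h3
  · intro hd
    have hr : y * e - 1 = (y0 * e - 1) + (y - y0) * e := by ring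
    rw [hr]
    exact dvd_add hdvd0 (Dvd.dvd.mul_right hd e)

-- no multiple of N1 strictly between 0 and N1
theorem pvNoMult (N1 d : Int) (hd : N1 ∣ d) (h1 : 0 < d) (h2 : d < N1) : False := by
  have := Int.le_of_dvd h1 hd; omega

-- loop-shape lemmas for A's fuelled while loop
theorem loop_done (e N1 : Int) (fuel : Nat) (data : List Int) (i : Int)
    (h : ¬ data.length < 3) : genDListLoop e N1 fuel data i = data := by
  cases fuel <;> simp [genDListLoop, h]

theorem loop_hit (e N1 : Int) (fuel : Nat) (data : List Int) (i : Int)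
    (hlen : data.length < 3) (hs : PySem.Int.mod (i * e) N1 = 1) :
    genDListLoop e N1 (1 + fuel) data i = genDListLoop e N1 fuel (data ++ [i]) (i + 1) := by
  rw [Nat.add_comm]
  simp [genDListLoop, hlen, hs]

theorem loop_skip (e N1 : Int) : ∀ (k fuel : Nat) (data : List Int) (i : Int),
    data.length < 3 →
    (∀ j : Int, i ≤ j → j < i + k → ¬ PySem.Int.mod (j * e) N1 = 1) →
    genDListLoop e N1 (k + fuel) data i = genDListLoop e N1 fuel data (i + k) := by
  intro k
  induction k with
  | zero => intro fuel data i _ _; simp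
  | succ n ih =>
    intro fuel data i hlen hno
    have hi : ¬ PySem.Int.mod (i * e) N1 = 1 := hno i le_rfl (by push_cast; omega)
    have step : genDListLoop e N1 (n + 1 + fuel) data i = genDListLoop e N1 (n + fuel) data (i + 1) := by
      have harith : n + 1 + fuel = (n + fuel) + 1 := by omega
      rw [harith]
      simp [genDListLoop, hlen, hi]
    rw [step, ih fuel data (i + 1) hlen (by intro j hj1 hj2; exact hno j (by omega) (by push_cast at hj2 ⊢; omega))]
    congr 1
    push_cast; ring

-- A's loop computes [y0, y0+N1, y0+2N1] given the first hit y0 with 2 ≤ y0 < 2 + N1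
theorem loopA_eval (e N1 y0 : Int) (hN : 2 ≤ N1) (hg : Int.gcd e N1 = 1)
    (hy0lo : 2 ≤ y0) (hy0hi : y0 < 2 + N1) (hy0 : (y0 * e) % N1 = 1) :
    genDList e N1 = [y0, y0 + N1, y0 + 2 * N1] := by
  have hmod : ∀ a : Int, PySem.Int.mod a N1 = a % N1 := fun a =>
    PySem.Int.mod_eq_emod_of_pos (by omega)
  have hsolP : ∀ j : Int, PySem.Int.mod (j * e) N1 = 1 ↔ N1 ∣ j - y0 := by
    intro j; rw [hmod]; exact sol_iff_dvd e N1 j y0 hN hg hy0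
  set k1 : Nat := (y0 - 2).toNat with hk1
  set k2 : Nat := (N1 - 1).toNat with hk2
  obtain ⟨rest, hF⟩ : ∃ rest, 3 * N1.natAbs + 4 = k1 + (1 + (k2 + (1 + (k2 + (1 + rest))))) := by
    refine ⟨3 * N1.natAbs + 4 - (k1 + 2 * k2 + 3), ?_⟩
    omega
  unfold genDList
  rw [hF]
  have h2k1 : (2 : Int) + (k1 : Int) = y0 := by omega
  rw [loop_skip e N1 k1 _ [] 2 (by simp) ?ns1]
  case ns1 =>
    intro j hj1 hj2 hs
    have hd := (hsolP j).1 hs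
    have hd' : N1 ∣ y0 - j := by
      have hn := (Int.dvd_neg).2 hd
      rwa [neg_sub] at hn
    exact pvNoMult N1 (y0 - j) hd' (by omega) (by omega)
  rw [h2k1]
  rw [loop_hit e N1 _ [] y0 (by simp) ((hsolP y0).2 ⟨0, by ring⟩)]
  simp only [List.nil_append]
  rw [loop_skip e N1 k2 _ [y0] (y0 + 1) (by simp) ?ns2]
  case ns2 =>
    intro j hj1 hj2 hs
    have hd := (hsolP j).1 hs
    exact pvNoMult N1 (j - y0) hd (by omega) (by omega)
  have hk2a : y0 + 1 + (k2 : Int) = y0 + N1 := by omega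
  rw [hk2a]
  rw [loop_hit e N1 _ [y0] (y0 + N1) (by simp) ((hsolP (y0 + N1)).2 ⟨1, by ring⟩)]
  rw [loop_skip e N1 k2 _ ([y0] ++ [y0 + N1]) (y0 + N1 + 1) (by simp) ?ns3]
  case ns3 =>
    intro j hj1 hj2 hs
    have hd := (hsolP j).1 hs
    have hd' : N1 ∣ j - y0 - N1 := by
      have hx := dvd_sub hd (dvd_refl N1)
      simpa using hx
    exact pvNoMult N1 (j - y0 - N1) hd' (by omega) (by omega)
  have hk2b : y0 + N1 + 1 + (k2 : Int) = y0 + 2 * N1 := by omega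
  rw [hk2b]
  rw [loop_hit e N1 _ ([y0] ++ [y0 + N1]) (y0 + 2 * N1) (by simp) ((hsolP (y0 + 2 * N1)).2 ⟨2, by ring⟩)]
  rw [loop_done e N1 _ _ _ (by simp)]
  simp

-- B's y0 has the required properties
theorem alt_y0 (e N1 : Int) (hN : 2 ≤ N1) (hg : Int.gcd e N1 = 1) :
    ∃ y0 : Int, genDList_alt e N1 = [y0, y0 + N1, y0 + 2 * N1] ∧
      2 ≤ y0 ∧ y0 < 2 + N1 ∧ (y0 * e) % N1 = 1 := by
  have hN0 : (0 : Int) < N1 := by omega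
  set sf : Int := (egcdLoop e N1 1 0).2 with hsf
  set g : Int := (egcdLoop e N1 1 0).1 with hgdef
  have hgcd : Int.gcd g 0 = Int.gcd e N1 := egcdLoop_gcd e N1 1 0
  have hpos : 0 < g := egcdLoop_pos e N1 1 0 (by omega) (Or.inr hN0)
  have hg1 : g = 1 := by
    rw [Int.gcd_zero_right, hg] at hgcd
    omega
  have hlin : N1 ∣ sf * e - g := egcdLoop_lin e N1 e N1 1 0 (by simp) (by simp)
  rw [hg1] at hlin
  have hinv : PySem.Int.mod sf N1 = sf % N1 := PySem.Int.mod_eq_emod_of_pos hN0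
  set inv : Int := sf % N1 with hinvdef
  have hdvdsub : N1 ∣ sf - inv := ⟨sf / N1, by linarith [Int.emod_add_mul_ediv sf N1]⟩
  have hinvsol : N1 ∣ inv * e - 1 := by
    have hr : inv * e - 1 = (sf * e - 1) - (sf - inv) * e := by ring
    rw [hr]
    exact dvd_sub hlin (Dvd.dvd.mul_right hdvdsub e)
  have hinvlo : 0 ≤ inv := Int.emod_nonneg sf (by omega)
  have hinvhi : inv < N1 := Int.emod_lt_of_pos sf hN0
  refine ⟨_, rfl, ?_, ?_, ?_⟩ <;> rw [hinv]
  · split <;> omega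
  · split <;> omega
  · split
    · exact (pvModOne N1 (inv * e) hN).2 hinvsol
    · refine (pvModOne N1 ((inv + N1) * e) hN).2 ?_
      have hr : (inv + N1) * e - 1 = (inv * e - 1) + N1 * e := by ring
      rw [hr]
      exact dvd_add hinvsol (dvd_mul_right N1 e)

-- ===== VERDICT (by name: the statement is the Claim_ definition above) =====
theorem genDList_spec : Claim_equal_genDList := by
  intro e N1 _ ⟨hN, hg⟩
  unfold Spec_genDList
  obtain ⟨y0, halt, hlo, hhi, hsol⟩ := alt_y0 e N1 hN hg
  rw [halt, loopA_eval e N1 y0 hN hg hlo hhi hsol]
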